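-- pv_equiv track=rewrite | github.com/TevLee/PS_Study | 211122/[211122]최고의집합.py | solution
-- ===== SOURCE A (Python) =====
-- def solution(n, s):
--     answer = []
--     if s // n < 1: return [-1]
--
--     item = s // n
--     for i in range(n):
--         answer.append(item)
--     if s % n != 0:
--         left = s % n
--         for i in range(1, left + 1):
--             answer[-i] += 1
--
--     return answer
-- ===== SOURCE B (Python) =====
-- def solution(n, s):
--     if s // n < 1:
--         return [-1]
--     # element i of the best set is floor((s + i) / n): the first n - s%n entries
--     # come out as s//n and the trailing s%n entries as s//n + 1.
--     return [(s + i) // n for i in range(n)]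
-- ===== Notes on version B (the rewrite author's own statement) =====
-- stated objective: alternative
-- what changed: Each entry is computed independently by the closed form (s+i)//n over i in range(n), instead of A's two staged passes (fill n copies of s//n, then increment the last s%n entries via negative indexing).
import Mathlib
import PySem

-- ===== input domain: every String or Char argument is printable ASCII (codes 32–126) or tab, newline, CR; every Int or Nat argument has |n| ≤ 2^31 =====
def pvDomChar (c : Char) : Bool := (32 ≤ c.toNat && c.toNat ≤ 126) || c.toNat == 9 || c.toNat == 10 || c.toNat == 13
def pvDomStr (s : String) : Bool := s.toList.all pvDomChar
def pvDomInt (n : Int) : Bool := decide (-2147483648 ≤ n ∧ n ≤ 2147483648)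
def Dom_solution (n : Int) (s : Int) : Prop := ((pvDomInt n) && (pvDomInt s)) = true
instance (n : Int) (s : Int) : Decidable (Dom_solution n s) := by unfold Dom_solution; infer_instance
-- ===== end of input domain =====

-- B computes each entry independently by the closed form (s+i)//n over i in range(n),
-- instead of A's two staged passes (fill then increment the last s%n via negative indexing); objective: alternative.

-- ===== PORT A =====
-- answer[-i] += 1 : read at Python negative index -i, then set there; within Pre_ the index is
-- always in range (1 ≤ i ≤ s%n < n = len(answer)), so the `none` branch is never taken.
def pyIncNeg (acc : List Int) (i : Int) : List Int :=
  match PySem.List.pyGet? acc (-i) with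
  | some v => acc.set ((acc.length : Int) - i).toNat (v + 1)
  | none => acc

def solution (n : Int) (s : Int) : List Int :=
  if PySem.Int.floordiv s n < 1 then [-1]
  else
    let item := PySem.Int.floordiv s n
    let answer := (PySem.List.pyRange 0 n).foldl (fun acc _ => acc ++ [item]) []
    if PySem.Int.mod s n ≠ 0 then
      let left := PySem.Int.mod s n
      (PySem.List.pyRange 1 (left + 1)).foldl pyIncNeg answer
    else answer

-- ===== PORT B =====
def solution_alt (n : Int) (s : Int) : List Int :=
  if PySem.Int.floordiv s n < 1 then [-1]
  else (PySem.List.pyRange 0 n).map (fun i => PySem.Int.floordiv (s + i) n)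

-- ===== PRECONDITION & SPEC =====
-- Python A raises ZeroDivisionError at n = 0 (s // n); that is the only input A does not return on.
def Pre_solution (n : Int) (s : Int) : Prop := n ≠ 0
instance (n : Int) (s : Int) : Decidable (Pre_solution n s) := by unfold Pre_solution; infer_instance
def pvWitness_solution : Int × Int := (5, 17)

def Spec_solution (n : Int) (s : Int) (out : List Int) : Prop := out = solution_alt n s
instance (n : Int) (s : Int) (out : List Int) : Decidable (Spec_solution n s out) := by unfold Spec_solution; infer_instance

-- ===== CLAIM (what is proved, stated in full; the proofs are below) =====
def Claim_equal_solution : Prop := ∀ (n : Int) (s : Int), Dom_solution n s → Pre_solution n s → Spec_solution n s (solution n s)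

-- ===== LEMMAS AND PROOFS =====

-- A's increment loop on a block of m copies of q: after i = 1..k it has turned the last k entries into q+1.
lemma incLoop (q : Int) (m k : Nat) (hk : k ≤ m) :
    (PySem.List.pyRange 1 ((k : Int) + 1)).foldl pyIncNeg (List.replicate m q)
      = List.replicate (m - k) q ++ List.replicate k (q + 1) := by
  induction k with
  | zero => simp
  | succ k ih =>
    have hk' : k ≤ m := Nat.le_of_succ_le hk
    have h1 : (1 : Int) ≤ (k : Int) + 1 := by omega
    rw [show ((k + 1 : Nat) : Int) + 1 = ((k : Int) + 1) + 1 by push_cast; ring,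
        PySem.List.pyRange_one_succ_right h1, List.foldl_append, ih hk']
    have hlen : (List.replicate (m - k) q ++ List.replicate k (q + 1)).length = m := by
      simp; omega
    have hidx : ((m : Int) - ((k : Int) + 1)).toNat = m - (k + 1) := by omega
    have hget : PySem.List.pyGet? (List.replicate (m - k) q ++ List.replicate k (q + 1))
        (-(((k : Int) + 1))) = some q := by
      simp only [PySem.List.pyGet?, PySem.List.pyIdx?, hlen]
      rw [if_pos (show -(m : Int) ≤ -((k : Int) + 1) by omega)]
      have e : (- -((k : Int) + 1)).toNat = k + 1 := by omega
      rw [e, if_neg (show ¬ (0 : Int) ≤ -((k : Int) + 1) by omega), Option.bind_some,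
          List.getElem?_append_left (by simp; omega)]
      simp [List.getElem?_replicate]
      omega
    simp only [List.foldl_cons, List.foldl_nil, pyIncNeg, hget, hlen, hidx]
    have hsplit : List.replicate (m - k) q = List.replicate (m - (k+1)) q ++ [q] := by
      rw [← List.replicate_succ']
      congr 1
      omega
    rw [hsplit, List.append_assoc, List.set_append_right _ _ (by simp)]
    simp [List.replicate_succ]

-- B's closed form on a positive n: element i of range(n) maps to q (i < n - r) or q + 1.
lemma mapForm (n s : Int) (hpos : 0 < n) :
    (PySem.List.pyRange 0 n).map (fun i => PySem.Int.floordiv (s + i) n)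
      = List.replicate (n - PySem.Int.mod s n).toNat (PySem.Int.floordiv s n)
        ++ List.replicate (PySem.Int.mod s n).toNat (PySem.Int.floordiv s n + 1) := by
  have hqr := PySem.Int.floordiv_mul_add_mod s n
  have hr0 : 0 ≤ PySem.Int.mod s n := PySem.Int.mod_nonneg s hpos
  have hrn : PySem.Int.mod s n < n := PySem.Int.mod_lt s hpos
  apply List.ext_getElem
  · simp [PySem.List.length_pyRange_one]
    omega
  · intro k hk1 hk2
    simp only [List.getElem_map, PySem.List.getElem_pyRange_one, zero_add]
    by_cases hcase : (k : Int) < n - PySem.Int.mod s n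
    · rw [List.getElem_append_left (by simpa using by omega)]
      simp only [List.getElem_replicate]
      rw [PySem.Int.floordiv_eq_iff_of_pos hpos]
      constructor <;> nlinarith [hqr]
    · rw [List.getElem_append_right (by simpa using by omega)]
      simp only [List.getElem_replicate]
      have hkn : (k : Int) < n := by
        have := PySem.List.length_pyRange_one 0 n
        simp [PySem.List.length_pyRange_one] at hk1
        omega
      rw [PySem.Int.floordiv_eq_iff_of_pos hpos]
      constructor <;> nlinarith [hqr]

lemma solution_eq (n s : Int) (hn : n ≠ 0) : solution n s = solution_alt n s := by
  unfold solution solution_alt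
  by_cases hq : PySem.Int.floordiv s n < 1
  · simp [hq]
  · simp only [hq, if_false]
    rw [PySem.List.foldl_append_singleton_eq_map (fun _ => PySem.Int.floordiv s n)]
    simp only [List.nil_append, List.map_const', PySem.List.length_pyRange_one]
    rcases lt_or_gt_of_ne hn with hneg | hpos
    · -- n < 0 : every list involved is empty
      have hr := PySem.Int.mod_neg_bounds s hneg
      have h2 : PySem.List.pyRange 0 n = [] := PySem.List.pyRange_one_eq_nil (by omega)
      have h3 : PySem.List.pyRange 1 (PySem.Int.mod s n + 1) = [] := by
        simp [PySem.List.pyRange_one]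
        omega
      by_cases hm : PySem.Int.mod s n = 0 <;>
        simp [hm, h2, h3] <;> omega
    · -- n > 0
      have hr0 : 0 ≤ PySem.Int.mod s n := PySem.Int.mod_nonneg s hpos
      have hrn : PySem.Int.mod s n < n := PySem.Int.mod_lt s hpos
      rw [mapForm n s hpos]
      rw [show (n - 0 : Int) = n from by ring]
      by_cases hm : PySem.Int.mod s n = 0
      · simp [hm]
      · simp only [hm, ne_eq, not_false_eq_true, if_true]
        have hcast : PySem.Int.mod s n = ((PySem.Int.mod s n).toNat : Int) := by omega
        rw [hcast, incLoop _ n.toNat _ (by omega)]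
        congr 2
        omega

-- ===== VERDICT (by name: the statement is the Claim_ definition above) =====
theorem solution_spec : Claim_equal_solution := by
  intro n s _ hpre
  unfold Spec_solution
  exact solution_eq n s hpre
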